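-- pv_equiv track=rewrite | github.com/phamson02/hackathon | ProbD/gen_test.py | py_solution
-- ===== SOURCE A (Python) =====
-- def py_solution(N, K, A, B):
--
--     def MulMod(a, b, mod):
--         res = [0] * N
--         for i in range(N):
--             for j in range(N):
--                 res[i] = (res[i] + a[(i+j)%N] * b[j]) % mod
--         return res
--
--     def PowMod(a, b, mod):
--         if b == 1:
--             return a
--         res = PowMod(a, b // 2, mod)
--         res = MulMod(res, res, mod)
--         if b % 2 == 1:
--             res = MulMod(res, a, mod)
--         return res
--
--     a = [0] * N
--     a[1] = 1
--     a[N-1] = 1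
--
--     a = PowMod(a, K, 1000000000)
--
--     return a[(B-A+N)%N]
-- ===== SOURCE B (Python) =====
-- def py_solution(N, K, A, B):
--     MOD = 1000000000
--
--     def mul(x, y):
--         # linear polynomial product, then fold the wraparound, one mod at the end
--         c = [0] * (2 * N)
--         for i in range(N):
--             for j in range(N):
--                 c[i + j] += x[i] * y[j]
--         return [(c[t] + c[t + N]) % MOD for t in range(N)]
--
--     base = [0] * N
--     base[1] = 1
--     base[N - 1] = 1
--     res = [0] * N
--     res[0] = 1
--     k = K
--     while k > 0:
--         if k % 2 == 1:
--             res = mul(res, base)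
--         base = mul(base, base)
--         k = k // 2
--     return res[(B - A) % N]
-- ===== Notes on version B (the rewrite author's own statement) =====
-- stated objective: alternative
-- what changed: B replaces A's recursive MSB exponentiation of a direct circular correlation (one mod per inner step) by an iterative LSB square-and-multiply loop with an explicit identity accumulator whose multiplication computes the full linear polynomial product, folds the wraparound, and reduces each coefficient mod 1e9 only once.
import Mathlib
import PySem

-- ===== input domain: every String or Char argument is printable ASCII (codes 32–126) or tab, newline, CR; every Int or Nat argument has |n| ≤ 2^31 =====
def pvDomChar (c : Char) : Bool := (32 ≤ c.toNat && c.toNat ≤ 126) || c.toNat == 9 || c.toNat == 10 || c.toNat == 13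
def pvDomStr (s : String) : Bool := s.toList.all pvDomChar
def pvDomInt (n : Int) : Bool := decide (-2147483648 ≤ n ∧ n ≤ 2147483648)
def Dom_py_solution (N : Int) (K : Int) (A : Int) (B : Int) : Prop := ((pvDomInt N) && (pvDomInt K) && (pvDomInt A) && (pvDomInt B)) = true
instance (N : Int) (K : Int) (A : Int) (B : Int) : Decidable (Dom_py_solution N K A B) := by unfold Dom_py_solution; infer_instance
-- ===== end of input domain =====

-- B replaces A's direct circular correlation inside a recursive MSB power routine by a
-- linear polynomial product folded at the wraparound (one mod per coefficient) inside an
-- iterative LSB square-and-multiply loop with an explicit identity accumulator (objective: alternative).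

-- ===== PORT A =====
-- inner/outer loops of MulMod; Python 'range(N)' is List.range N.toNat (exact for N ≥ 0,
-- the only case Pre_ admits); list indices that Python computes are nonnegative on Pre_.
def pyAMulMod (N : Int) (md : Int) (a b : List Int) : List Int :=
  (List.range N.toNat).foldl (fun res i =>
    (List.range N.toNat).foldl (fun res j =>
      res.set i (PySem.Int.mod
        (res.getD i 0 + a.getD ((PySem.Int.mod (Int.ofNat i + Int.ofNat j) N).toNat) 0 * b.getD j 0) md)) res)
    (List.replicate N.toNat 0)

-- Python's PowMod recurses on b//2; for b ≤ 0 the Python recursion never terminates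
-- (RecursionError, outside Pre_), so the port returns `a` there as a totality guard.
def pyAPowMod (N : Int) (md : Int) (a : List Int) (b : Int) : List Int :=
  if b = 1 then a
  else if b ≤ 0 then a
  else
    let r := pyAPowMod N md a (PySem.Int.floordiv b 2)
    let r2 := pyAMulMod N md r r
    if PySem.Int.mod b 2 = 1 then pyAMulMod N md r2 a else r2
termination_by b.toNat
decreasing_by
  have h2 : PySem.Int.floordiv b 2 = b / 2 := PySem.Int.floordiv_eq_ediv_of_pos (by omega)
  simp only [h2]; omega

def py_solution (N : Int) (K : Int) (A : Int) (B : Int) : Int :=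
  let a0 := ((List.replicate N.toNat 0).set 1 1).set (N - 1).toNat 1
  let a := pyAPowMod N 1000000000 a0 K
  a.getD ((PySem.Int.mod (B - A + N) N).toNat) 0

-- ===== PORT B =====
def pyBMul (N : Int) (x y : List Int) : List Int :=
  let c := (List.range N.toNat).foldl (fun c i =>
    (List.range N.toNat).foldl (fun c j =>
      c.set (i + j) (c.getD (i + j) 0 + x.getD i 0 * y.getD j 0)) c)
    (List.replicate (2 * N.toNat) 0)
  (List.range N.toNat).map (fun t => PySem.Int.mod (c.getD t 0 + c.getD (t + N.toNat) 0) 1000000000)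

-- the 'while k > 0' loop of B
def pyBLoop (N : Int) (res base : List Int) (k : Int) : List Int :=
  if k ≤ 0 then res
  else pyBLoop N (if PySem.Int.mod k 2 = 1 then pyBMul N res base else res)
         (pyBMul N base base) (PySem.Int.floordiv k 2)
termination_by k.toNat
decreasing_by
  have h2 : PySem.Int.floordiv k 2 = k / 2 := PySem.Int.floordiv_eq_ediv_of_pos (by omega)
  simp only [h2]; omega

def py_solution_alt (N : Int) (K : Int) (A : Int) (B : Int) : Int :=
  let base := ((List.replicate N.toNat 0).set 1 1).set (N - 1).toNat 1
  let res := (List.replicate N.toNat 0).set 0 1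
  (pyBLoop N res base K).getD ((PySem.Int.mod (B - A) N).toNat) 0

-- ===== PRECONDITION & SPEC =====
-- A raises IndexError for N < 2 (a[1] on a list of length < 2) and hits the recursion
-- limit (RecursionError) for K ≤ 0, since PowMod's base case is b == 1; Pre_ excludes exactly those.
def Pre_py_solution (N : Int) (K : Int) (A : Int) (B : Int) : Prop := 2 ≤ N ∧ 1 ≤ K
instance (N : Int) (K : Int) (A : Int) (B : Int) : Decidable (Pre_py_solution N K A B) := by
  unfold Pre_py_solution; infer_instance

def pvWitness_py_solution : Int × Int × Int × Int := (2, 1, 0, 0)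

def Spec_py_solution (N : Int) (K : Int) (A : Int) (B : Int) (out : Int) : Prop := out = py_solution_alt N K A B
instance (N : Int) (K : Int) (A : Int) (B : Int) (out : Int) : Decidable (Spec_py_solution N K A B out) := by
  unfold Spec_py_solution; infer_instance

-- ===== CLAIM (what is proved, stated in full; the proofs are below) =====
def Claim_equal_py_solution : Prop := ∀ (N : Int) (K : Int) (A : Int) (B : Int), Dom_py_solution N K A B → Pre_py_solution N K A B → Spec_py_solution N K A B (py_solution N K A B)


-- ===== LEMMAS AND PROOFS =====

theorem pvGetD_set_self (l : List Int) (i : ℕ) (v : Int) (h : i < l.length) :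
    (l.set i v).getD i 0 = v := by
  simp [List.getD_eq_getElem?_getD, h]

theorem pvGetD_set_ne (l : List Int) (i t : ℕ) (v : Int) (h : i ≠ t) :
    (l.set i v).getD t 0 = l.getD t 0 := by
  simp [List.getD_eq_getElem?_getD, List.getElem?_set, h]

theorem pvSet_getD_self (l : List Int) (i : ℕ) (h : i < l.length) :
    l.set i (l.getD i 0) = l := by
  apply List.ext_getElem?
  intro j
  rw [List.getElem?_set]
  by_cases hij : i = j
  · subst hij
    simp [List.getD_eq_getElem?_getD, h]
  · simp [hij]

theorem pvGetD_replicate (n t : ℕ) : (List.replicate n (0:Int)).getD t 0 = 0 := by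
  by_cases h : t < n
  · simp [List.getD_eq_getElem?_getD, h]
  · simp [List.getD_eq_getElem?_getD, h]

theorem pvFoldSet (i : ℕ) (φ : Int → ℕ → Int) :
    ∀ (l : List ℕ) (r : List Int), i < r.length →
      List.foldl (fun r j => r.set i (φ (r.getD i 0) j)) r l
        = r.set i (List.foldl φ (r.getD i 0) l) := by
  intro l
  induction l with
  | nil => intro r h; exact (pvSet_getD_self r i h).symm
  | cons a l ih =>
      intro r h
      rw [List.foldl_cons, ih _ (by simp; omega), List.set_set,
        pvGetD_set_self r i _ h, List.foldl_cons]

theorem pvFoldMod (M : Int) (g : ℕ → Int) :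
    ∀ (l : List ℕ) (s0 : Int), l ≠ [] →
      List.foldl (fun s j => (s + g j) % M) s0 l = (s0 + (l.map g).sum) % M := by
  intro l
  induction l with
  | nil => intro s0 h; exact absurd rfl h
  | cons a l ih =>
      intro s0 _
      by_cases hl : l = []
      · subst hl; simp
      · rw [List.foldl_cons, ih _ hl, Int.emod_add_emod, List.map_cons, List.sum_cons]
        ring_nf

theorem pvFoldAdd (kf : ℕ → ℕ) (v : ℕ → Int) :
    ∀ (l : List ℕ) (c : List Int), (∀ j ∈ l, kf j < c.length) →
      ((List.foldl (fun c j => c.set (kf j) (c.getD (kf j) 0 + v j)) c l).length = c.length ∧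
       ∀ t, (List.foldl (fun c j => c.set (kf j) (c.getD (kf j) 0 + v j)) c l).getD t 0
          = c.getD t 0 + (l.map (fun j => if kf j = t then v j else 0)).sum) := by
  intro l
  induction l with
  | nil => intro c _; exact ⟨rfl, fun t => by simp⟩
  | cons a l ih =>
      intro c hb
      have ha : kf a < c.length := hb a (by simp)
      have hlen : (c.set (kf a) (c.getD (kf a) 0 + v a)).length = c.length := by simp
      obtain ⟨ih1, ih2⟩ := ih (c.set (kf a) (c.getD (kf a) 0 + v a))
        (fun j hj => by rw [hlen]; exact hb j (by simp [hj]))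
      refine ⟨by rw [List.foldl_cons, ih1, hlen], fun t => ?_⟩
      rw [List.foldl_cons, ih2 t, List.map_cons, List.sum_cons]
      by_cases hat : kf a = t
      · subst hat
        rw [pvGetD_set_self c _ _ ha]
        simp; ring
      · rw [pvGetD_set_ne c _ _ _ hat]
        simp [hat]

theorem pvFoldPointAdd (L : ℕ) (P : ℕ → Prop) (add : ℕ → ℕ → Int) (step : List Int → ℕ → List Int)
    (hlen : ∀ c i, c.length = L → P i → (step c i).length = L)
    (hpt : ∀ c i t, c.length = L → P i → (step c i).getD t 0 = c.getD t 0 + add i t) :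
    ∀ (l : List ℕ) (c : List Int), c.length = L → (∀ i ∈ l, P i) →
      ((List.foldl step c l).length = L ∧
       ∀ t, (List.foldl step c l).getD t 0 = c.getD t 0 + (l.map (fun i => add i t)).sum) := by
  intro l
  induction l with
  | nil => intro c hc _; exact ⟨hc, fun t => by simp⟩
  | cons a l ih =>
      intro c hc hP
      have ha : P a := hP a (by simp)
      obtain ⟨ih1, ih2⟩ := ih (step c a) (hlen c a hc ha) (fun i hi => hP i (by simp [hi]))
      exact ⟨by rw [List.foldl_cons, ih1], fun t => by
        rw [List.foldl_cons, ih2 t, hpt c a t hc ha, List.map_cons, List.sum_cons]; ring⟩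

theorem pvSumRange (f : ℕ → Int) : ∀ n : ℕ, ((List.range n).map f).sum = ∑ j ∈ Finset.range n, f j := by
  intro n
  induction n with
  | zero => simp
  | succ n ih => rw [List.range_succ, Finset.sum_range_succ, List.map_append, List.sum_append, ih]; simp

-- the one-cell-per-iteration outer loop of A's MulMod
theorem pvAOuter (n : ℕ) (hn : 0 < n) (g : ℕ → ℕ → Int) (M : Int) :
    ∀ (l : List ℕ) (r : List Int), r.length = n → l.Nodup → (∀ i ∈ l, i < n) →
      ((List.foldl (fun r i => (List.range n).foldl
          (fun r j => r.set i ((r.getD i 0 + g i j) % M)) r) r l).length = n ∧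
       ∀ t, (List.foldl (fun r i => (List.range n).foldl
          (fun r j => r.set i ((r.getD i 0 + g i j) % M)) r) r l).getD t 0
         = if t ∈ l then (r.getD t 0 + ((List.range n).map (g t)).sum) % M else r.getD t 0) := by
  intro l
  induction l with
  | nil => intro r hr _ _; exact ⟨hr, fun t => by simp⟩
  | cons i l ih =>
      intro r hr hnd hmem
      have hi : i < n := hmem i (by simp)
      have hrange : (List.range n) ≠ [] := by simp [List.range_eq_nil]; omega
      have hstep : (List.range n).foldl (fun r j => r.set i ((r.getD i 0 + g i j) % M)) r
          = r.set i ((r.getD i 0 + ((List.range n).map (g i)).sum) % M) := by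
        rw [pvFoldSet i (fun s j => (s + g i j) % M) (List.range n) r (by omega),
          pvFoldMod M (g i) (List.range n) _ hrange]
      have hlen' : (r.set i ((r.getD i 0 + ((List.range n).map (g i)).sum) % M)).length = n := by
        simp [hr]
      obtain ⟨ih1, ih2⟩ := ih (r.set i ((r.getD i 0 + ((List.range n).map (g i)).sum) % M))
        hlen' (List.Nodup.of_cons hnd) (fun j hj => hmem j (by simp [hj]))
      refine ⟨by rw [List.foldl_cons, hstep, ih1], fun t => ?_⟩
      rw [List.foldl_cons, hstep, ih2 t]
      by_cases hti : t = i
      · subst hti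
        have htl : t ∉ l := by
          have := List.nodup_cons.mp hnd; exact this.1
        simp only [htl, if_false, List.mem_cons, true_or, if_true]
        exact pvGetD_set_self r t _ (by omega)
      · rw [pvGetD_set_ne r i t _ (fun h => hti h.symm)]
        by_cases htl : t ∈ l
        · simp [htl, hti]
        · simp [htl, hti]

theorem pvGetD_map_range (f : ℕ → Int) (n t : ℕ) (h : t < n) :
    ((List.range n).map f).getD t 0 = f t := by
  simp [List.getD_eq_getElem?_getD, List.getElem?_range, h]

theorem pvAMul_char (N : Int) (hN : 2 ≤ N) (a b : List Int) :
    (pyAMulMod N 1000000000 a b).length = N.toNat ∧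
    ∀ t, t < N.toNat → (pyAMulMod N 1000000000 a b).getD t 0
      = (((List.range N.toNat).map (fun j => a.getD ((t + j) % N.toNat) 0 * b.getD j 0)).sum) % 1000000000 := by
  have hm : ∀ x : Int, PySem.Int.mod x 1000000000 = x % 1000000000 :=
    fun x => PySem.Int.mod_eq_emod_of_pos (by norm_num)
  have hidx : ∀ i j : ℕ, (PySem.Int.mod (Int.ofNat i + Int.ofNat j) N).toNat = (i + j) % N.toNat := by
    intro i j
    rw [PySem.Int.mod_eq_emod_of_pos (by omega)]
    have h1 : Int.ofNat i + Int.ofNat j = ((i + j : ℕ) : ℤ) := by simp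
    rw [h1]
    conv_lhs => rw [show N = ((N.toNat : ℕ) : ℤ) by omega]
    rw [← Int.natCast_emod]
    exact Int.toNat_natCast _
  obtain ⟨h1, h2⟩ := pvAOuter N.toNat (by omega)
    (fun i j => a.getD ((i + j) % N.toNat) 0 * b.getD j 0) 1000000000
    (List.range N.toNat) (List.replicate N.toNat 0) (by simp) (List.nodup_range)
    (fun i hi => List.mem_range.mp hi)
  constructor
  · simp only [pyAMulMod, hm, hidx]
    exact h1
  · intro t ht
    simp only [pyAMulMod, hm, hidx]
    rw [h2 t]
    simp [List.mem_range, ht, pvGetD_replicate]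

theorem pvBMul_char (N : Int) (hN : 2 ≤ N) (x y : List Int) :
    (pyBMul N x y).length = N.toNat ∧
    ∀ t, t < N.toNat → (pyBMul N x y).getD t 0 =
      ( ((List.range N.toNat).map (fun i => ((List.range N.toNat).map
            (fun j => if i + j = t then x.getD i 0 * y.getD j 0 else 0)).sum)).sum
      + ((List.range N.toNat).map (fun i => ((List.range N.toNat).map
            (fun j => if i + j = t + N.toNat then x.getD i 0 * y.getD j 0 else 0)).sum)).sum ) % 1000000000 := by
  have hm : ∀ x : Int, PySem.Int.mod x 1000000000 = x % 1000000000 :=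
    fun x => PySem.Int.mod_eq_emod_of_pos (by norm_num)
  have hstep : ∀ (c : List Int) (i : ℕ), c.length = 2 * N.toNat → i < N.toNat →
      (((List.range N.toNat).foldl (fun c j => c.set (i + j) (c.getD (i + j) 0 + x.getD i 0 * y.getD j 0)) c).length = c.length ∧
       ∀ t, ((List.range N.toNat).foldl (fun c j => c.set (i + j) (c.getD (i + j) 0 + x.getD i 0 * y.getD j 0)) c).getD t 0
          = c.getD t 0 + ((List.range N.toNat).map (fun j => if i + j = t then x.getD i 0 * y.getD j 0 else 0)).sum) := by
    intro c i hc hi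
    exact pvFoldAdd (fun j => i + j) (fun j => x.getD i 0 * y.getD j 0) (List.range N.toNat) c
      (fun j hj => by show i + j < c.length; rw [hc]; have := List.mem_range.mp hj; omega)
  obtain ⟨hc1, hc2⟩ := pvFoldPointAdd (2 * N.toNat) (fun i => i < N.toNat)
      (fun i t => ((List.range N.toNat).map (fun j => if i + j = t then x.getD i 0 * y.getD j 0 else 0)).sum)
      (fun c i => (List.range N.toNat).foldl (fun c j => c.set (i + j) (c.getD (i + j) 0 + x.getD i 0 * y.getD j 0)) c)
      (fun c i hc hi => by rw [(hstep c i hc hi).1, hc])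
      (fun c i t hc hi => (hstep c i hc hi).2 t)
      (List.range N.toNat) (List.replicate (2 * N.toNat) 0) (by simp) (fun i hi => List.mem_range.mp hi)
  constructor
  · simp [pyBMul]
  · intro t ht
    simp only [pyBMul]
    rw [pvGetD_map_range _ _ _ ht, hm, hc2 t, hc2 (t + N.toNat), pvGetD_replicate, pvGetD_replicate]
    ring_nf

def pvOne (n : ℕ) : ZMod n → ZMod 1000000000 := fun t => if t = 0 then 1 else 0
def pvConv {n : ℕ} [NeZero n] (f g : ZMod n → ZMod 1000000000) : ZMod n → ZMod 1000000000 :=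
  fun t => ∑ i : ZMod n, f i * g (t - i)
def pvCor {n : ℕ} [NeZero n] (f g : ZMod n → ZMod 1000000000) : ZMod n → ZMod 1000000000 :=
  fun t => ∑ i : ZMod n, f (t + i) * g i

def pvRel (n : ℕ) [NeZero n] (v : List Int) (f : ZMod n → ZMod 1000000000) : Prop :=
  v.length = n ∧ ∀ i : ℕ, i < n → v.getD i 0 = ((f ((i : ℕ) : ZMod n)).val : ℤ)

theorem pvCast_val (s : ℤ) : (((s : ZMod 1000000000)).val : ℤ) = s % 1000000000 := by
  have := ZMod.val_intCast (n := 1000000000) s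
  rw [this]
  norm_num

theorem pvVal_roundtrip (x : ZMod 1000000000) : (((x.val : ℤ)) : ZMod 1000000000) = x := by
  push_cast
  exact ZMod.natCast_rightInverse x

theorem pvNatCast_mod (n a : ℕ) (hn : 0 < n) : ((a % n : ℕ) : ZMod n) = (a : ZMod n) := by
  conv_rhs => rw [← Nat.div_add_mod a n]
  push_cast [ZMod.natCast_self]
  ring

theorem pvSumZMod (n : ℕ) [NeZero n] (F : ZMod n → ZMod 1000000000) :
    ∑ j ∈ Finset.range n, F ((j : ℕ) : ZMod n) = ∑ z : ZMod n, F z := by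
  refine Finset.sum_nbij' (i := fun j => ((j : ℕ) : ZMod n)) (j := fun z => z.val)
    (fun a _ => Finset.mem_univ _) (fun z _ => Finset.mem_range.mpr (ZMod.val_lt z))
    (fun a ha => ZMod.val_cast_of_lt (Finset.mem_range.mp ha))
    (fun z _ => ZMod.natCast_rightInverse z) (fun a _ => rfl)

theorem pvSumIte (n i u : ℕ) (f : ℕ → ℤ) :
    (∑ j ∈ Finset.range n, if i + j = u then f j else 0) = if i ≤ u ∧ u - i < n then f (u - i) else 0 := by
  by_cases h : i ≤ u ∧ u - i < n
  · rw [Finset.sum_eq_single (u - i)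
      (fun j _ hj => by rw [if_neg (by omega)])
      (fun hmem => absurd (Finset.mem_range.mpr h.2) hmem)]
    rw [if_pos (by omega), if_pos h]
  · rw [if_neg h]
    apply Finset.sum_eq_zero
    intro j hj
    have := Finset.mem_range.mp hj
    rw [if_neg (by omega)]

theorem pvRelA (N : Int) (hN : 2 ≤ N) (a b : List Int) (fa fb : ZMod N.toNat → ZMod 1000000000)
    [NeZero N.toNat] (ha : pvRel N.toNat a fa) (hb : pvRel N.toNat b fb) :
    pvRel N.toNat (pyAMulMod N 1000000000 a b) (pvCor fa fb) := by
  have hn : 0 < N.toNat := by omega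
  obtain ⟨hl, he⟩ := pvAMul_char N hN a b
  refine ⟨hl, fun t ht => ?_⟩
  rw [he t ht]
  have key : ((((List.range N.toNat).map (fun j => a.getD ((t + j) % N.toNat) 0 * b.getD j 0)).sum : ℤ) : ZMod 1000000000)
      = pvCor fa fb ((t : ℕ) : ZMod N.toNat) := by
    rw [pvSumRange]
    push_cast
    have hterm : ∀ j ∈ Finset.range N.toNat,
        ((a.getD ((t + j) % N.toNat) 0 : ℤ) : ZMod 1000000000) * ((b.getD j 0 : ℤ) : ZMod 1000000000)
        = fa (((t : ℕ) : ZMod N.toNat) + ((j : ℕ) : ZMod N.toNat)) * fb ((j : ℕ) : ZMod N.toNat) := by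
      intro j hj
      have hjn := Finset.mem_range.mp hj
      rw [ha.2 ((t + j) % N.toNat) (Nat.mod_lt _ hn), hb.2 j hjn,
        pvVal_roundtrip, pvVal_roundtrip, pvNatCast_mod _ _ hn]
      push_cast
      rfl
    rw [Finset.sum_congr rfl hterm]
    exact pvSumZMod N.toNat (fun z => fa (((t : ℕ) : ZMod N.toNat) + z) * fb z)
  calc (((List.range N.toNat).map (fun j => a.getD ((t + j) % N.toNat) 0 * b.getD j 0)).sum) % 1000000000
      = (((((List.range N.toNat).map (fun j => a.getD ((t + j) % N.toNat) 0 * b.getD j 0)).sum : ℤ) : ZMod 1000000000).val : ℤ) := (pvCast_val _).symm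
    _ = ((pvCor fa fb ((t : ℕ) : ZMod N.toNat)).val : ℤ) := by rw [key]

theorem pvRelB (N : Int) (hN : 2 ≤ N) (x y : List Int) (fx fy : ZMod N.toNat → ZMod 1000000000)
    [NeZero N.toNat] (hx : pvRel N.toNat x fx) (hy : pvRel N.toNat y fy) :
    pvRel N.toNat (pyBMul N x y) (pvConv fx fy) := by
  have hn : 0 < N.toNat := by omega
  obtain ⟨hl, he⟩ := pvBMul_char N hN x y
  refine ⟨hl, fun t ht => ?_⟩
  rw [he t ht]
  have regroup :
      ((List.range N.toNat).map (fun i => ((List.range N.toNat).map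
          (fun j => if i + j = t then x.getD i 0 * y.getD j 0 else 0)).sum)).sum
      + ((List.range N.toNat).map (fun i => ((List.range N.toNat).map
          (fun j => if i + j = t + N.toNat then x.getD i 0 * y.getD j 0 else 0)).sum)).sum
      = ∑ i ∈ Finset.range N.toNat, x.getD i 0 * y.getD ((t + N.toNat - i) % N.toNat) 0 := by
    rw [pvSumRange, pvSumRange, ← Finset.sum_add_distrib]
    refine Finset.sum_congr rfl (fun i hi => ?_)
    have hin := Finset.mem_range.mp hi
    rw [pvSumRange, pvSumRange, pvSumIte, pvSumIte]
    by_cases hit : i ≤ t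
    · rw [if_pos (by omega), if_neg (by omega)]
      have h1 : t + N.toNat - i = (t - i) + N.toNat := by omega
      rw [h1, Nat.add_mod_right, Nat.mod_eq_of_lt (by omega)]
      ring
    · rw [if_neg (by omega), if_pos (by omega)]
      rw [Nat.mod_eq_of_lt (by omega)]
      ring
  rw [regroup]
  have key : ((( ∑ i ∈ Finset.range N.toNat, x.getD i 0 * y.getD ((t + N.toNat - i) % N.toNat) 0 : ℤ)) : ZMod 1000000000)
      = pvConv fx fy ((t : ℕ) : ZMod N.toNat) := by
    push_cast
    have hterm : ∀ i ∈ Finset.range N.toNat,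
        ((x.getD i 0 : ℤ) : ZMod 1000000000) * ((y.getD ((t + N.toNat - i) % N.toNat) 0 : ℤ) : ZMod 1000000000)
        = fx ((i : ℕ) : ZMod N.toNat) * fy (((t : ℕ) : ZMod N.toNat) - ((i : ℕ) : ZMod N.toNat)) := by
      intro i hi
      have hin := Finset.mem_range.mp hi
      rw [hx.2 i hin, hy.2 ((t + N.toNat - i) % N.toNat) (Nat.mod_lt _ hn),
        pvVal_roundtrip, pvVal_roundtrip, pvNatCast_mod _ _ hn]
      have harg : (((t + N.toNat - i : ℕ)) : ZMod N.toNat) = ((t : ℕ) : ZMod N.toNat) - ((i : ℕ) : ZMod N.toNat) := by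
        rw [Nat.cast_sub (by omega)]
        push_cast [ZMod.natCast_self]
        ring
      rw [harg]
    rw [Finset.sum_congr rfl hterm]
    exact pvSumZMod N.toNat (fun z => fx z * fy (((t : ℕ) : ZMod N.toNat) - z))
  calc (∑ i ∈ Finset.range N.toNat, x.getD i 0 * y.getD ((t + N.toNat - i) % N.toNat) 0) % 1000000000
      = ((((∑ i ∈ Finset.range N.toNat, x.getD i 0 * y.getD ((t + N.toNat - i) % N.toNat) 0 : ℤ)) : ZMod 1000000000).val : ℤ) := (pvCast_val _).symm
    _ = ((pvConv fx fy ((t : ℕ) : ZMod N.toNat)).val : ℤ) := by rw [key]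

def pvRev {n : ℕ} (f : ZMod n → ZMod 1000000000) : ZMod n → ZMod 1000000000 := fun t => f (-t)
def pvPow {n : ℕ} [NeZero n] (f : ZMod n → ZMod 1000000000) : ℕ → (ZMod n → ZMod 1000000000)
  | 0 => pvOne n
  | (k+1) => pvConv f (pvPow f k)

theorem pvConv_comm {n : ℕ} [NeZero n] (f g : ZMod n → ZMod 1000000000) : pvConv f g = pvConv g f := by
  funext t
  exact Fintype.sum_equiv (Equiv.subLeft t) _ _ (fun x => by simp [mul_comm])

theorem pvConv_assoc {n : ℕ} [NeZero n] (f g h : ZMod n → ZMod 1000000000) :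
    pvConv (pvConv f g) h = pvConv f (pvConv g h) := by
  funext t
  show ∑ i : ZMod n, (∑ j : ZMod n, f j * g (i - j)) * h (t - i) = _
  have : ∀ i : ZMod n, (∑ j : ZMod n, f j * g (i - j)) * h (t - i)
      = ∑ j : ZMod n, f j * (g (i - j) * h (t - i)) := by
    intro i; rw [Finset.sum_mul]; exact Finset.sum_congr rfl (fun j _ => by ring)
  rw [Finset.sum_congr rfl (fun i _ => this i), Finset.sum_comm]
  refine Finset.sum_congr rfl (fun j _ => ?_)
  show ∑ i : ZMod n, f j * (g (i - j) * h (t - i)) = f j * ∑ i : ZMod n, g i * h ((t - j) - i)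
  rw [Finset.mul_sum]
  exact Fintype.sum_equiv (Equiv.subRight j) _ _ (fun u => by
    have h1 : u - j = u - j := rfl
    have h2 : t - u = (t - j) - (u - j) := by ring
    rw [Equiv.subRight_apply, ← h2])

theorem pvConv_one {n : ℕ} [NeZero n] (f : ZMod n → ZMod 1000000000) : pvConv f (pvOne n) = f := by
  funext t
  show (∑ i : ZMod n, f i * if t - i = 0 then 1 else 0) = f t
  rw [Fintype.sum_eq_single t (fun b hb => by simp [sub_eq_zero, (Ne.symm hb)])]
  simp

theorem pvOne_conv {n : ℕ} [NeZero n] (f : ZMod n → ZMod 1000000000) : pvConv (pvOne n) f = f := by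
  rw [pvConv_comm, pvConv_one]

theorem pvRev_one (n : ℕ) : pvRev (pvOne n) = pvOne n := by
  funext t; simp [pvRev, pvOne, neg_eq_zero]

theorem pvRev_conv {n : ℕ} [NeZero n] (f g : ZMod n → ZMod 1000000000) :
    pvRev (pvConv f g) = pvConv (pvRev f) (pvRev g) := by
  funext t
  show ∑ i : ZMod n, f i * g (-t - i) = ∑ i : ZMod n, f (-i) * g (-(t - i))
  exact Fintype.sum_equiv (Equiv.neg (ZMod n)) _ _ (fun u => by
    have h1 : -t - u = -(t - -u) := by ring
    rw [Equiv.neg_apply, neg_neg, ← h1])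

theorem pvCor_eq {n : ℕ} [NeZero n] (f g : ZMod n → ZMod 1000000000) : pvCor f g = pvConv f (pvRev g) := by
  funext t
  show ∑ i : ZMod n, f (t + i) * g i = ∑ i : ZMod n, f i * g (-(t - i))
  exact Fintype.sum_equiv (Equiv.addLeft t) _ _ (fun u => by
    have h1 : u = -(t - (t + u)) := by ring
    rw [Equiv.coe_addLeft, ← h1])

theorem pvPow_add {n : ℕ} [NeZero n] (f : ZMod n → ZMod 1000000000) (m k : ℕ) :
    pvPow f (m + k) = pvConv (pvPow f m) (pvPow f k) := by
  induction m with
  | zero => simp [pvPow, pvOne_conv]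
  | succ m ih =>
      have : m + 1 + k = (m + k) + 1 := by omega
      rw [this]
      show pvConv f (pvPow f (m + k)) = _
      rw [ih]
      show pvConv f (pvConv (pvPow f m) (pvPow f k)) = pvConv (pvConv f (pvPow f m)) (pvPow f k)
      rw [pvConv_assoc]

theorem pvRev_pow {n : ℕ} [NeZero n] (f : ZMod n → ZMod 1000000000) (hf : pvRev f = f) :
    ∀ k, pvRev (pvPow f k) = pvPow f k
  | 0 => pvRev_one n
  | (k+1) => by
      show pvRev (pvConv f (pvPow f k)) = _
      rw [pvRev_conv, hf, pvRev_pow f hf k]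
      rfl

theorem pvPow_sq {n : ℕ} [NeZero n] (f : ZMod n → ZMod 1000000000) :
    ∀ k, pvPow (pvConv f f) k = pvPow f (2 * k)
  | 0 => rfl
  | (k+1) => by
      show pvConv (pvConv f f) (pvPow (pvConv f f) k) = _
      rw [pvPow_sq f k, pvConv_assoc]
      have h1 : 2 * (k + 1) = (2 * k + 1) + 1 := by omega
      rw [h1]
      show _ = pvConv f (pvPow f (2 * k + 1))
      rfl

theorem pvCastInj (n i j : ℕ) (hi : i < n) (hj : j < n) (h : ((i : ℕ) : ZMod n) = ((j : ℕ) : ZMod n)) : i = j := by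
  have := congrArg ZMod.val h
  rwa [ZMod.val_cast_of_lt hi, ZMod.val_cast_of_lt hj] at this

def pvBase (n : ℕ) : ZMod n → ZMod 1000000000 := fun z => if z = 1 ∨ z = -1 then 1 else 0

theorem pvRev_base (n : ℕ) : pvRev (pvBase n) = pvBase n := by
  funext z
  show (if -z = 1 ∨ -z = -1 then (1 : ZMod 1000000000) else 0) = _
  have h1 : (-z = 1 ∨ -z = -1) ↔ (z = 1 ∨ z = -1) := by
    constructor
    · rintro (h | h)
      · right; rw [← h]; ring
      · left; have := congrArg Neg.neg h; simpa using this
    · rintro (h | h)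
      · right; rw [h]
      · left; rw [h]; ring
  rw [if_congr h1 rfl rfl]
  rfl

theorem pvRel_base (N : Int) (hN : 2 ≤ N) [NeZero N.toNat] :
    pvRel N.toNat (((List.replicate N.toNat 0).set 1 1).set (N - 1).toNat 1) (pvBase N.toNat) := by
  have hn : 2 ≤ N.toNat := by omega
  have hN1 : (N - 1).toNat = N.toNat - 1 := by omega
  constructor
  · simp
  · intro i hi
    haveI : Fact (1 < N.toNat) := ⟨by omega⟩
    haveI : Fact (1 < 1000000000) := ⟨by norm_num⟩
    have hone : ((1 : ZMod N.toNat) = ((1 : ℕ) : ZMod N.toNat)) := by push_cast; rfl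
    have hneg : ((-1 : ZMod N.toNat) = ((N.toNat - 1 : ℕ) : ZMod N.toNat)) := by
      rw [Nat.cast_sub (by omega)]
      push_cast [ZMod.natCast_self]
      ring
    have hcond : (((i : ℕ) : ZMod N.toNat) = 1 ∨ ((i : ℕ) : ZMod N.toNat) = -1) ↔ (i = 1 ∨ i = N.toNat - 1) := by
      constructor
      · rintro (h | h)
        · left; exact pvCastInj _ _ _ hi (by omega) (h.trans hone)
        · right; exact pvCastInj _ _ _ hi (by omega) (h.trans hneg)
      · rintro (h | h)
        · left; rw [h]; exact hone.symm
        · right; rw [h]; exact hneg.symm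
    by_cases hc : i = 1 ∨ i = N.toNat - 1
    · have hval : (((List.replicate N.toNat (0:ℤ)).set 1 1).set (N - 1).toNat 1).getD i 0 = 1 := by
        rcases hc with h | h
        · by_cases h2 : i = N.toNat - 1
          · rw [hN1, ← h2]
            exact pvGetD_set_self _ _ _ (by simp; omega)
          · rw [hN1, pvGetD_set_ne _ _ _ _ (by omega), h]
            exact pvGetD_set_self _ _ _ (by simp; omega)
        · rw [hN1, ← h]
          exact pvGetD_set_self _ _ _ (by simp; omega)
      rw [hval]
      show (1 : ℤ) = ((pvBase N.toNat ((i : ℕ) : ZMod N.toNat)).val : ℤ)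
      rw [pvBase, if_pos (hcond.mpr hc), ZMod.val_one]
      simp
    · have hval : (((List.replicate N.toNat (0:ℤ)).set 1 1).set (N - 1).toNat 1).getD i 0 = 0 := by
        rw [hN1, pvGetD_set_ne _ _ _ _ (by omega), pvGetD_set_ne _ _ _ _ (by omega)]
        exact pvGetD_replicate _ _
      rw [hval]
      show (0 : ℤ) = ((pvBase N.toNat ((i : ℕ) : ZMod N.toNat)).val : ℤ)
      rw [pvBase, if_neg (fun h => hc (hcond.mp h))]
      simp

theorem pvRel_one (N : Int) (hN : 2 ≤ N) [NeZero N.toNat] :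
    pvRel N.toNat ((List.replicate N.toNat 0).set 0 1) (pvOne N.toNat) := by
  have hn : 2 ≤ N.toNat := by omega
  constructor
  · simp
  · intro i hi
    haveI : Fact (1 < N.toNat) := ⟨by omega⟩
    haveI : Fact (1 < 1000000000) := ⟨by norm_num⟩
    by_cases h0 : i = 0
    · subst h0
      rw [pvGetD_set_self _ _ _ (by simp; omega)]
      show (1 : ℤ) = ((pvOne N.toNat ((0 : ℕ) : ZMod N.toNat)).val : ℤ)
      rw [pvOne, if_pos (by push_cast; rfl), ZMod.val_one]
      simp
    · rw [pvGetD_set_ne _ _ _ _ (fun h => h0 h.symm), pvGetD_replicate]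
      show (0 : ℤ) = ((pvOne N.toNat ((i : ℕ) : ZMod N.toNat)).val : ℤ)
      rw [pvOne, if_neg (fun h => h0 (pvCastInj N.toNat i 0 hi (by omega) (by rw [h]; push_cast; rfl)))]
      simp

theorem pvPowA (N : Int) (hN : 2 ≤ N) [NeZero N.toNat] (a : List Int)
    (fa : ZMod N.toNat → ZMod 1000000000) (hs : pvRev fa = fa) (ha : pvRel N.toNat a fa) :
    ∀ (m : ℕ) (b : Int), 1 ≤ b → b.toNat = m →
      pvRel N.toNat (pyAPowMod N 1000000000 a b) (pvPow fa b.toNat) := by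
  intro m
  induction m using Nat.strong_induction_on with
  | _ m ih =>
    intro b hb hbm
    rw [pyAPowMod]
    by_cases h1 : b = 1
    · rw [if_pos h1, h1]
      show pvRel N.toNat a (pvPow fa (1 : Int).toNat)
      have : pvPow fa (1 : Int).toNat = fa := by
        show pvConv fa (pvPow fa 0) = fa
        show pvConv fa (pvOne N.toNat) = fa
        exact pvConv_one fa
      rw [this]; exact ha
    · rw [if_neg h1, if_neg (by omega)]
      have hb2 : 2 ≤ b := by omega
      have hfd : PySem.Int.floordiv b 2 = ((b.toNat / 2 : ℕ) : ℤ) := by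
        rw [PySem.Int.floordiv_eq_ediv_of_pos (by omega)]; omega
      have htn : (PySem.Int.floordiv b 2).toNat = b.toNat / 2 := by rw [hfd]; omega
      have hrec : pvRel N.toNat (pyAPowMod N 1000000000 a (PySem.Int.floordiv b 2))
          (pvPow fa (b.toNat / 2)) := by
        have := ih (b.toNat / 2) (by omega) (PySem.Int.floordiv b 2)
          (by rw [hfd]; omega) htn
        rwa [htn] at this
      have hsq : pvRel N.toNat
          (pyAMulMod N 1000000000 (pyAPowMod N 1000000000 a (PySem.Int.floordiv b 2))
            (pyAPowMod N 1000000000 a (PySem.Int.floordiv b 2)))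
          (pvPow fa (b.toNat / 2 + b.toNat / 2)) := by
        have := pvRelA N hN _ _ _ _ hrec hrec
        rwa [show pvCor (pvPow fa (b.toNat / 2)) (pvPow fa (b.toNat / 2))
            = pvPow fa (b.toNat / 2 + b.toNat / 2) by
          rw [pvCor_eq, pvRev_pow fa hs, ← pvPow_add]] at this
      have hm2 : PySem.Int.mod b 2 = ((b.toNat % 2 : ℕ) : ℤ) := by
        rw [PySem.Int.mod_eq_emod_of_pos (by norm_num)]; omega
      by_cases hodd : b.toNat % 2 = 1
      · rw [if_pos (by rw [hm2]; exact_mod_cast congrArg (Nat.cast : ℕ → ℤ) hodd)]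
        have := pvRelA N hN _ _ _ _ hsq ha
        rwa [show pvCor (pvPow fa (b.toNat / 2 + b.toNat / 2)) fa = pvPow fa b.toNat by
          rw [pvCor_eq, hs, pvConv_comm]
          conv_rhs => rw [show b.toNat = (b.toNat / 2 + b.toNat / 2) + 1 from by omega]
          rfl] at this
      · rw [if_neg (by rw [hm2]; intro hcontra; omega)]
        have : pvPow fa b.toNat = pvPow fa (b.toNat / 2 + b.toNat / 2) := by
          congr 1
          omega
        rw [this]
        exact hsq

theorem pvLoopB (N : Int) (hN : 2 ≤ N) [NeZero N.toNat] :
    ∀ (m : ℕ) (k : Int) (res base : List Int)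
      (fr fb : ZMod N.toNat → ZMod 1000000000), k.toNat = m →
      pvRel N.toNat res fr → pvRel N.toNat base fb →
      pvRel N.toNat (pyBLoop N res base k) (pvConv fr (pvPow fb k.toNat)) := by
  intro m
  induction m using Nat.strong_induction_on with
  | _ m ih =>
    intro k res base fr fb hkm hres hbase
    rw [pyBLoop]
    by_cases hk : k ≤ 0
    · rw [if_pos hk]
      have : k.toNat = 0 := by omega
      rw [this]
      show pvRel N.toNat res (pvConv fr (pvOne N.toNat))
      rw [pvConv_one]
      exact hres
    · rw [if_neg hk]
      have hk1 : 1 ≤ k := by omega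
      have hfd : PySem.Int.floordiv k 2 = ((k.toNat / 2 : ℕ) : ℤ) := by
        rw [PySem.Int.floordiv_eq_ediv_of_pos (by omega)]; omega
      have hm2 : PySem.Int.mod k 2 = ((k.toNat % 2 : ℕ) : ℤ) := by
        rw [PySem.Int.mod_eq_emod_of_pos (by norm_num)]; omega
      have hbase' : pvRel N.toNat (pyBMul N base base) (pvConv fb fb) :=
        pvRelB N hN _ _ _ _ hbase hbase
      by_cases hodd : k.toNat % 2 = 1
      · rw [if_pos (by rw [hm2]; exact_mod_cast congrArg (Nat.cast : ℕ → ℤ) hodd)]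
        have hres' : pvRel N.toNat (pyBMul N res base) (pvConv fr fb) :=
          pvRelB N hN _ _ _ _ hres hbase
        have := ih ((PySem.Int.floordiv k 2).toNat) (by rw [hfd]; omega)
          (PySem.Int.floordiv k 2) _ _ _ _ rfl hres' hbase'
        rwa [show pvConv (pvConv fr fb) (pvPow (pvConv fb fb) (PySem.Int.floordiv k 2).toNat)
            = pvConv fr (pvPow fb k.toNat) by
          rw [pvPow_sq, pvConv_assoc]
          congr 1
          have h2 : 2 * (PySem.Int.floordiv k 2).toNat + 1 = k.toNat := by rw [hfd]; omega
          rw [← h2]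
          rfl] at this
      · rw [if_neg (by rw [hm2]; intro hcontra; omega)]
        have := ih ((PySem.Int.floordiv k 2).toNat) (by rw [hfd]; omega)
          (PySem.Int.floordiv k 2) _ _ _ _ rfl hres hbase'
        rwa [show pvConv fr (pvPow (pvConv fb fb) (PySem.Int.floordiv k 2).toNat)
            = pvConv fr (pvPow fb k.toNat) by
          rw [pvPow_sq]
          congr 2
          rw [hfd]; omega] at this

theorem pvMain (N K A B : Int) (hN : 2 ≤ N) (hK : 1 ≤ K) :
    py_solution N K A B = py_solution_alt N K A B := by
  haveI : NeZero N.toNat := ⟨by omega⟩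
  have hbase := pvRel_base N hN
  have hsym := pvRev_base N.toNat
  have hA := pvPowA N hN _ _ hsym hbase K.toNat K hK rfl
  have hone := pvRel_one N hN
  have hB := pvLoopB N hN K.toNat K _ _ _ _ rfl hone hbase
  rw [pvOne_conv] at hB
  have hNpos : (0:ℤ) < N := by omega
  have hidx : PySem.Int.mod (B - A + N) N = PySem.Int.mod (B - A) N := by
    rw [PySem.Int.mod_eq_emod_of_pos hNpos, PySem.Int.mod_eq_emod_of_pos hNpos,
      show B - A + N = B - A + N * 1 from by ring, Int.add_mul_emod_self_left]
  have hbound : (PySem.Int.mod (B - A) N).toNat < N.toNat := by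
    rw [PySem.Int.mod_eq_emod_of_pos hNpos]
    have h1 := Int.emod_lt_of_pos (B - A) hNpos
    have h2 : 0 ≤ (B - A) % N := Int.emod_nonneg (B - A) (show N ≠ 0 by omega)
    omega
  show (pyAPowMod N 1000000000 (((List.replicate N.toNat 0).set 1 1).set (N - 1).toNat 1) K).getD
        ((PySem.Int.mod (B - A + N) N).toNat) 0
     = (pyBLoop N ((List.replicate N.toNat 0).set 0 1)
        (((List.replicate N.toNat 0).set 1 1).set (N - 1).toNat 1) K).getD
        ((PySem.Int.mod (B - A) N).toNat) 0
  rw [hidx, hA.2 _ hbound, hB.2 _ hbound]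


-- ===== VERDICT (by name: the statement is the Claim_ definition above) =====
theorem py_solution_spec : Claim_equal_py_solution := by
  intro N K A B _ hpre
  show py_solution N K A B = py_solution_alt N K A B
  exact pvMain N K A B hpre.1 hpre.2
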